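-- pv_equiv track=rewrite | github.com/AEM147/bolt | bolt_ai_v2/bolt_v2/code/content_extractor.py | _extract_all_matches
-- ===== SOURCE A (Python) =====
-- def _extract_all_matches(
--     text: str,
--     patterns: list[tuple[str, str]],
-- ) -> list[str]:
--     """Extract all matching entities from text (companies, technologies).
--
--     Like fuzzy_pdf_parser's row-by-row extraction, but for entity mentions.
--     """
--     text_lower = text.lower()
--     found = []
--     seen = set()
--     for pattern, canonical in patterns:
--         if pattern in text_lower and canonical not in seen:
--             found.append(canonical)
--             seen.add(canonical)
--     return found
-- ===== SOURCE B (Python) =====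
-- def _extract_all_matches(
--     text: str,
--     patterns: list[tuple[str, str]],
-- ) -> list[str]:
--     """Window index: collect all text substrings of the needed pattern lengths into
--     one set, so each pattern is a single set lookup instead of a scan of the text."""
--     tl = text.lower()
--     n = len(tl)
--     windows = {tl[i:i + L] for L in {len(p) for p, _ in patterns} for i in range(n - L + 1)}
--     return list(dict.fromkeys(c for p, c in patterns if p in windows))
-- ===== Notes on version B (the rewrite author's own statement) =====
-- stated objective: alternative
-- what changed: Instead of scanning the text once per pattern, B builds one hashed set of all text substrings of the needed pattern lengths so each pattern becomes a single set lookup, and dedups the canonicals with dict.fromkeys instead of a seen-set loop; it trades C-optimized substring scans for a Python-level window index, so it is not measurably faster.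
import Mathlib
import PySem

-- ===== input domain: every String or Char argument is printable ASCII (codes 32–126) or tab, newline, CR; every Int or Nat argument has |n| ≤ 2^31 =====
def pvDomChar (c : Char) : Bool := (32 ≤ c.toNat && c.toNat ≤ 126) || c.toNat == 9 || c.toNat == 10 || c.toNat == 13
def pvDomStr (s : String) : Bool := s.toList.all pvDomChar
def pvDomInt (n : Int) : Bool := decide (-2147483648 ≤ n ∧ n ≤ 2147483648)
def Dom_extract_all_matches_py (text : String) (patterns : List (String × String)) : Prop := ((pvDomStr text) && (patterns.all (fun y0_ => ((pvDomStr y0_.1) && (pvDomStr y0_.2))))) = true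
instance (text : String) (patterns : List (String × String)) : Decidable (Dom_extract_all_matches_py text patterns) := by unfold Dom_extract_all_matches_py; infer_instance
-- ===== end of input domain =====

-- B replaces A's per-pattern text scan by one set of all text substrings of the needed
-- lengths (each pattern becomes one set lookup) and dedups canonicals with dict.fromkeys (alternative).

-- ===== PORT A =====
def extract_all_matches_py (text : String) (patterns : List (String × String)) : List String :=
  let text_lower := PySem.Str.lower text
  (patterns.foldl
    (fun (st : List String × PySem.Set String) pc =>
      if PySem.Str.isIn pc.1 text_lower && !(PySem.Set.contains st.2 pc.2)
      then (st.1 ++ [pc.2], PySem.Set.add st.2 pc.2)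
      else st)
    ([], PySem.Set.empty)).1

-- ===== PORT B =====
def extract_all_matches_py_alt (text : String) (patterns : List (String × String)) : List String :=
  let tl := PySem.Str.lower text
  let n : Int := PySem.Str.len tl
  let lens : PySem.Set Int := PySem.Set.ofList (patterns.map (fun pc => PySem.Str.len pc.1))
  -- {tl[i:i+L] for L in lens for i in range(n - L + 1)}: a Set, consumed only by membership
  let windows : PySem.Set String :=
    PySem.Set.ofList (lens.flatMap (fun L =>
      (PySem.List.pyRange 0 (n - L + 1)).map (fun i => PySem.Str.slice tl (some i) (some (i + L)))))
  PySem.List.dedup ((patterns.filter (fun pc => PySem.Set.contains windows pc.1)).map Prod.snd)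

-- ===== PRECONDITION & SPEC =====
def Spec_extract_all_matches_py (text : String) (patterns : List (String × String)) (out : List String) : Prop := out = extract_all_matches_py_alt text patterns
instance (text : String) (patterns : List (String × String)) (out : List String) : Decidable (Spec_extract_all_matches_py text patterns out) := by unfold Spec_extract_all_matches_py; infer_instance

-- ===== CLAIM (what is proved, stated in full; the proofs are below) =====
def Claim_equal_extract_all_matches_py : Prop := ∀ (text : String) (patterns : List (String × String)), Dom_extract_all_matches_py text patterns → Spec_extract_all_matches_py text patterns (extract_all_matches_py text patterns)

-- ===== LEMMAS AND PROOFS =====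

-- a string p whose length is among `lens` occurs among the windows iff it is a substring
lemma mem_windows_iff (tl p : String) (lens : List Int)
    (hL : PySem.Str.len p ∈ lens) (hnn : ∀ L ∈ lens, 0 ≤ L) :
    (p ∈ lens.flatMap (fun L =>
        (PySem.List.pyRange 0 (PySem.Str.len tl - L + 1)).map
          (fun i => PySem.Str.slice tl (some i) (some (i + L)))))
      ↔ PySem.Str.isIn p tl = true := by
  have hlen : PySem.Str.len tl = (tl.toList.length : Int) := PySem.Str.len_eq tl
  constructor
  · rintro h
    rw [List.mem_flatMap] at h
    obtain ⟨L, hLm, hp⟩ := h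
    rw [List.mem_map] at hp
    obtain ⟨i, hi, rfl⟩ := hp
    rw [PySem.List.mem_pyRange_one] at hi
    have h0L : 0 ≤ L := hnn L hLm
    have h0i : (0:Int) ≤ i := hi.1
    rw [show PySem.Str.isIn = fun a b => PySem.Chars.isIn a.toList b.toList from rfl]
    rw [← PySem.Chars.exists_prefix_drop_iff_isIn]
    refine ⟨i.toNat, ?_⟩
    rw [PySem.Str.toList_slice, PySem.Chars.slice_eq_listSlice,
        PySem.List.slice_toNat tl.toList h0i (by omega)]
    exact List.take_prefix _ _
  · intro h
    have h' : ∃ j, p.toList <+: tl.toList.drop j := by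
      rw [PySem.Chars.exists_prefix_drop_iff_isIn]
      exact h
    obtain ⟨j, hj⟩ := h'
    set m := tl.toList.length with hm
    have hj' : p.toList <+: tl.toList.drop (min j m) := by
      rcases le_or_gt j m with hle | hgt
      · simpa [min_eq_left hle] using hj
      · have : tl.toList.drop j = [] := List.drop_eq_nil_of_le (by omega)
        rw [this] at hj
        have : p.toList = [] := List.prefix_nil.mp hj
        simp [this]
    set j' := min j m with hj'def
    have hlenle : p.toList.length ≤ m - j' := by
      have := hj'.length_le
      simpa [List.length_drop] using this
    have hj'm : j' ≤ m := by omega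
    rw [List.mem_flatMap]
    refine ⟨PySem.Str.len p, hL, ?_⟩
    rw [List.mem_map]
    refine ⟨(j' : Int), ?_, ?_⟩
    · rw [PySem.List.mem_pyRange_one]
      have hplen : PySem.Str.len p = (p.toList.length : Int) := PySem.Str.len_eq p
      constructor
      · exact_mod_cast Nat.zero_le j'
      · rw [hlen, hplen]; omega
    · apply String.toList_inj.mp
      have hplen : PySem.Str.len p = (p.toList.length : Int) := PySem.Str.len_eq p
      rw [PySem.Str.toList_slice, PySem.Chars.slice_eq_listSlice,
          PySem.List.slice_toNat tl.toList (by exact_mod_cast Nat.zero_le j')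
            (by rw [hplen]; omega)]
      have htn : ((j' : Int) + PySem.Str.len p).toNat - ((j' : Int)).toNat = p.toList.length := by
        rw [hplen]; omega
      rw [htn]
      exact ((List.prefix_iff_eq_take.mp hj').symm)

-- A's loop keeps found = seen (same list); with both components equal it is Set.update
lemma foldA_eq (tl : String) (ps : List (String × String)) (acc : List String) :
    (ps.foldl
      (fun (st : List String × PySem.Set String) pc =>
        if PySem.Str.isIn pc.1 tl && !(PySem.Set.contains st.2 pc.2)
        then (st.1 ++ [pc.2], PySem.Set.add st.2 pc.2)
        else st)
      (acc, acc)).1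
    = PySem.Set.update acc ((ps.filter (fun pc => PySem.Str.isIn pc.1 tl)).map Prod.snd) := by
  induction ps generalizing acc with
  | nil => simp [PySem.Set.update]
  | cons pc ps ih =>
    simp only [List.foldl_cons, List.filter_cons]
    cases h1 : PySem.Str.isIn pc.1 tl
    · simpa [h1] using ih acc
    · by_cases h2 : pc.2 ∈ acc
      · have hc : PySem.Set.contains acc pc.2 = true := (PySem.Set.contains_iff acc pc.2).mpr h2
        simp only [hc, Bool.not_true, Bool.and_false, Bool.false_eq_true, if_false]
        rw [ih acc]
        simp [PySem.Set.update, PySem.Set.add, h2]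
      · have hc : PySem.Set.contains acc pc.2 = false := by
          cases hcc : PySem.Set.contains acc pc.2
          · rfl
          · exact absurd ((PySem.Set.contains_iff acc pc.2).mp hcc) h2
        have hadd : PySem.Set.add acc pc.2 = acc ++ [pc.2] := by
          simp [PySem.Set.add, h2]
        simp only [hc, Bool.not_false, Bool.and_true, if_true, hadd]
        rw [ih (acc ++ [pc.2])]
        simp [PySem.Set.update, PySem.Set.add, h2]

-- ===== VERDICT (by name: the statement is the Claim_ definition above) =====
theorem extract_all_matches_py_spec : Claim_equal_extract_all_matches_py := by
  intro text patterns _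
  unfold Spec_extract_all_matches_py extract_all_matches_py extract_all_matches_py_alt
  simp only []
  set tl := PySem.Str.lower text with htl
  rw [show (PySem.Set.empty : PySem.Set String) = ([] : List String) from rfl]
  rw [foldA_eq tl patterns []]
  rw [show ∀ (l : List String), PySem.Set.update ([] : PySem.Set String) l = PySem.List.dedup l from
    fun l => by rw [PySem.List.dedup_eq_ofList, PySem.Set.ofList_eq_foldl]; rfl]
  congr 1
  apply congrArg
  apply List.filter_congr
  intro pc hpc
  have hL : PySem.Str.len pc.1 ∈ PySem.Set.ofList (patterns.map (fun pc => PySem.Str.len pc.1)) := by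
    rw [PySem.Set.mem_ofList]
    exact List.mem_map.mpr ⟨pc, hpc, rfl⟩
  have hnn : ∀ L ∈ PySem.Set.ofList (patterns.map (fun pc => PySem.Str.len pc.1)), 0 ≤ L := by
    intro L hLm
    rw [PySem.Set.mem_ofList] at hLm
    obtain ⟨q, _, rfl⟩ := List.mem_map.mp hLm
    rw [PySem.Str.len_eq]
    exact_mod_cast Nat.zero_le _
  rw [Bool.eq_iff_iff, PySem.Set.contains_iff, PySem.Set.mem_ofList,
      mem_windows_iff tl pc.1 _ hL hnn]
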